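-- pv_equiv track=rewrite | github.com/Frost50104/SalesControl | vad_worker/vad_worker/vad.py | frames_to_segments
-- ===== SOURCE A (Python) =====
-- def frames_to_segments(
--     frames: list[tuple[int, bytes]],
--     speech_flags: list[bool],
--     frame_duration_ms: int = 30,
--     min_speech_ms: int = 100,
--     min_silence_ms: int = 300,
-- ) -> list[tuple[int, int]]:
--     """
--     Convert speech flags to speech segments with smoothing.
--
--     Uses a simple state machine with hysteresis:
--     - Requires min_speech_ms of continuous speech to start a segment
--     - Requires min_silence_ms of continuous silence to end a segment
--
--     Returns:
--         List of (start_ms, end_ms) tuples for speech segments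
--     """
--     if not frames or not speech_flags:
--         return []
--
--     min_speech_frames = max(1, min_speech_ms // frame_duration_ms)
--     min_silence_frames = max(1, min_silence_ms // frame_duration_ms)
--
--     segments = []
--     in_speech = False
--     speech_start_ms = 0
--     consecutive_speech = 0
--     consecutive_silence = 0
--
--     for i, (start_ms, _) in enumerate(frames):
--         is_speech = speech_flags[i]
--
--         if not in_speech:
--             if is_speech:
--                 consecutive_speech += 1
--                 if consecutive_speech >= min_speech_frames:
--                     # Start new speech segment
--                     in_speech = True
--                     speech_start_ms = start_ms - (consecutive_speech - 1) * frame_duration_ms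
--                     consecutive_silence = 0
--             else:
--                 consecutive_speech = 0
--         else:
--             if is_speech:
--                 consecutive_silence = 0
--             else:
--                 consecutive_silence += 1
--                 if consecutive_silence >= min_silence_frames:
--                     # End speech segment
--                     end_ms = start_ms - (consecutive_silence - 1) * frame_duration_ms
--                     if end_ms > speech_start_ms:
--                         segments.append((speech_start_ms, end_ms))
--                     in_speech = False
--                     consecutive_speech = 0
--
--     # Handle segment that extends to end of audio
--     if in_speech:
--         end_ms = frames[-1][0] + frame_duration_ms
--         if end_ms > speech_start_ms:
--             segments.append((speech_start_ms, end_ms))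
--
--     return segments
-- ===== SOURCE B (Python) =====
-- def frames_to_segments(
--     frames,
--     speech_flags,
--     frame_duration_ms=30,
--     min_speech_ms=100,
--     min_silence_ms=300,
-- ):
--     """Two staged passes instead of one stateful hysteresis loop:
--     pass 1 emits threshold-crossing events from flag streak counting,
--     pass 2 pairs open/close events into segments (with end-of-audio flush)."""
--     if not frames or not speech_flags:
--         return []
--
--     min_speech_frames = max(1, min_speech_ms // frame_duration_ms)
--     min_silence_frames = max(1, min_silence_ms // frame_duration_ms)
--
--     # Pass 1: threshold-crossing events (kind, boundary_ms); kind True = open.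
--     events = []
--     prev = None
--     streak = 0
--     for (t, _), flag in zip(frames, speech_flags):
--         streak = streak + 1 if flag == prev else 1
--         prev = flag
--         if flag and streak == min_speech_frames:
--             events.append((True, t - (min_speech_frames - 1) * frame_duration_ms))
--         elif not flag and streak == min_silence_frames:
--             events.append((False, t - (min_silence_frames - 1) * frame_duration_ms))
--
--     # Pass 2: pair events into segments; flush an open segment at end of audio.
--     final_end = frames[-1][0] + frame_duration_ms
--     segments = []
--     open_start = None
--     for kind, ms in events:
--         if open_start is None:
--             if kind:
--                 open_start = ms
--         elif not kind:
--             if open_start < ms: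
--                 segments.append((open_start, ms))
--             open_start = None
--     if open_start is not None and open_start < final_end:
--         segments.append((open_start, final_end))
--     return segments
-- ===== Notes on version B (the rewrite author's own statement) =====
-- stated objective: alternative
-- what changed: A's single 5-state hysteresis loop (segments, in_speech, start, two consecutive counters) is replaced by two staged passes: pass 1 emits threshold-crossing events from plain flag-streak counting, pass 2 pairs open/close events into segments with an end-of-audio flush.
import Mathlib
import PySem

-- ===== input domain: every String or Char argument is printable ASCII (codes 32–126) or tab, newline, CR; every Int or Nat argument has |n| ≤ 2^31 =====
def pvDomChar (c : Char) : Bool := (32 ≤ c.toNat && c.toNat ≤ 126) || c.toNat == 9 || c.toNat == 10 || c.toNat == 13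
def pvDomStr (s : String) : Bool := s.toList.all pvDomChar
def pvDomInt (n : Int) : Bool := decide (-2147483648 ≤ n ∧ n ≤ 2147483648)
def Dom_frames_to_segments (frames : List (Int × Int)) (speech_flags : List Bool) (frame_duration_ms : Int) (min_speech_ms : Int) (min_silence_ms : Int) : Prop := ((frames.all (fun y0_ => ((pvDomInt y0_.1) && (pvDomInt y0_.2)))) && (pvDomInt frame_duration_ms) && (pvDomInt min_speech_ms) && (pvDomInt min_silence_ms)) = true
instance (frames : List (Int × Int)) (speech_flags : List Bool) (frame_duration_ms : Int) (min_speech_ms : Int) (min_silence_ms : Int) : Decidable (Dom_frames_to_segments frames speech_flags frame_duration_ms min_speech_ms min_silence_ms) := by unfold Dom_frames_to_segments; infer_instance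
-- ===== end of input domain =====

-- B replaces A's single 5-state hysteresis loop by two staged passes (streak
-- threshold events, then event pairing); objective: alternative decomposition.

-- ===== PORT A =====
-- A's frame loop; under Pre_ (flags at least as long as frames) 'speech_flags[i]'
-- is exactly the paired iteration over (frames.map Prod.fst).zip speech_flags.
-- State: (segments, in_speech, speech_start_ms, consecutive_speech, consecutive_silence).
def pvLoopA (fdm msf msl : Int) :
    List (Int × Bool) → List (Int × Int) × Bool × Int × Int × Int →
    List (Int × Int) × Bool × Int × Int × Int
  | [], st => st
  | (t, flag) :: rest, (segs, inSp, start, cs, csil) =>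
    if inSp = false then
      if flag then
        let cs' := cs + 1
        if msf ≤ cs' then
          pvLoopA fdm msf msl rest (segs, true, t - (cs' - 1) * fdm, cs', 0)
        else
          pvLoopA fdm msf msl rest (segs, false, start, cs', csil)
      else
        pvLoopA fdm msf msl rest (segs, false, start, 0, csil)
    else
      if flag then
        pvLoopA fdm msf msl rest (segs, true, start, cs, 0)
      else
        let csil' := csil + 1
        if msl ≤ csil' then
          let endMs := t - (csil' - 1) * fdm
          let segs' := if start < endMs then segs ++ [(start, endMs)] else segs
          pvLoopA fdm msf msl rest (segs', false, start, 0, csil')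
        else
          pvLoopA fdm msf msl rest (segs, true, start, cs, csil')

def frames_to_segments (frames : List (Int × Int)) (speech_flags : List Bool) (frame_duration_ms : Int) (min_speech_ms : Int) (min_silence_ms : Int) : List (Int × Int) :=
  if frames = [] ∨ speech_flags = [] then [] else
  let msf := max 1 (PySem.Int.floordiv min_speech_ms frame_duration_ms)
  let msl := max 1 (PySem.Int.floordiv min_silence_ms frame_duration_ms)
  let st := pvLoopA frame_duration_ms msf msl
      ((frames.map Prod.fst).zip speech_flags) ([], false, 0, 0, 0)
  let segs := st.1
  let inSp := st.2.1
  let start := st.2.2.1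
  if inSp then
    -- frames[-1][0] + frame_duration_ms
    let endMs := (PySem.List.pyGet? (frames.map Prod.fst) (-1)).getD 0 + frame_duration_ms
    if start < endMs then segs ++ [(start, endMs)] else segs
  else segs

-- ===== PORT B =====
-- Source B pass 1: threshold-crossing events from flag streak counting.
-- (kind, boundary_ms); kind true = open candidate, false = close candidate.
def pvEvents (fdm msf msl : Int) : List (Int × Bool) → Option Bool → Int → List (Bool × Int)
  | [], _, _ => []
  | (t, f) :: rest, prev, streak =>
    let s := if prev = some f then streak + 1 else 1
    let tail := pvEvents fdm msf msl rest (some f) s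
    if f = true ∧ s = msf then (true, t - (msf - 1) * fdm) :: tail
    else if f = false ∧ s = msl then (false, t - (msl - 1) * fdm) :: tail
    else tail

-- Source B pass 2: pair open/close events; flush an open segment with final_end.
def pvPair (fe : Int) : List (Bool × Int) → Option Int → List (Int × Int) → List (Int × Int)
  | [], none, segs => segs
  | [], some st, segs => if st < fe then segs ++ [(st, fe)] else segs
  | (k, ms) :: rest, none, segs =>
    if k then pvPair fe rest (some ms) segs else pvPair fe rest none segs
  | (k, ms) :: rest, some st, segs =>
    if k then pvPair fe rest (some st) segs
    else pvPair fe rest none (if st < ms then segs ++ [(st, ms)] else segs)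

def frames_to_segments_alt (frames : List (Int × Int)) (speech_flags : List Bool) (frame_duration_ms : Int) (min_speech_ms : Int) (min_silence_ms : Int) : List (Int × Int) :=
  if frames = [] ∨ speech_flags = [] then [] else
  let msf := max 1 (PySem.Int.floordiv min_speech_ms frame_duration_ms)
  let msl := max 1 (PySem.Int.floordiv min_silence_ms frame_duration_ms)
  let events := pvEvents frame_duration_ms msf msl
      ((frames.map Prod.fst).zip speech_flags) none 0
  let finalEnd := (PySem.List.pyGet? (frames.map Prod.fst) (-1)).getD 0 + frame_duration_ms
  pvPair finalEnd events none []

-- ===== PRECONDITION & SPEC =====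
-- Pre_ excludes exactly the inputs where Python A raises: frame_duration_ms = 0
-- (ZeroDivisionError in //) and speech_flags shorter than frames (IndexError);
-- both only matter when the early return for empty inputs is not taken.
def Pre_frames_to_segments (frames : List (Int × Int)) (speech_flags : List Bool) (frame_duration_ms : Int) (min_speech_ms : Int) (min_silence_ms : Int) : Prop :=
  frames = [] ∨ speech_flags = [] ∨ (frame_duration_ms ≠ 0 ∧ frames.length ≤ speech_flags.length)
instance (frames : List (Int × Int)) (speech_flags : List Bool) (frame_duration_ms : Int) (min_speech_ms : Int) (min_silence_ms : Int) : Decidable (Pre_frames_to_segments frames speech_flags frame_duration_ms min_speech_ms min_silence_ms) := by unfold Pre_frames_to_segments; infer_instance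

def pvWitness_frames_to_segments : (List (Int × Int)) × List Bool × Int × Int × Int :=
  ([(0, 0), (30, 0), (60, 0), (90, 0), (120, 0), (150, 0)],
   [true, true, true, true, false, false], 30, 60, 60)

def Spec_frames_to_segments (frames : List (Int × Int)) (speech_flags : List Bool) (frame_duration_ms : Int) (min_speech_ms : Int) (min_silence_ms : Int) (out : List (Int × Int)) : Prop := out = frames_to_segments_alt frames speech_flags frame_duration_ms min_speech_ms min_silence_ms
instance (frames : List (Int × Int)) (speech_flags : List Bool) (frame_duration_ms : Int) (min_speech_ms : Int) (min_silence_ms : Int) (out : List (Int × Int)) : Decidable (Spec_frames_to_segments frames speech_flags frame_duration_ms min_speech_ms min_silence_ms out) := by unfold Spec_frames_to_segments; infer_instance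

-- ===== CLAIM =====
def Claim_equal_frames_to_segments : Prop := ∀ (frames : List (Int × Int)) (speech_flags : List Bool) (frame_duration_ms : Int) (min_speech_ms : Int) (min_silence_ms : Int), Dom_frames_to_segments frames speech_flags frame_duration_ms min_speech_ms min_silence_ms → Pre_frames_to_segments frames speech_flags frame_duration_ms min_speech_ms min_silence_ms → Spec_frames_to_segments frames speech_flags frame_duration_ms min_speech_ms min_silence_ms (frames_to_segments frames speech_flags frame_duration_ms min_speech_ms min_silence_ms)

-- ===== LEMMAS AND PROOFS =====

-- A's post-loop flush, as a function of the loop's final state.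
def pvFlush (fe : Int) (r : List (Int × Int) × Bool × Int × Int × Int) : List (Int × Int) :=
  if r.2.1 = true then (if r.2.2.1 < fe then r.1 ++ [(r.2.2.1, fe)] else r.1) else r.1

-- One-step equations for pvPair (definitional).
theorem pvPairOpen (fe ms : Int) (rest : List (Bool × Int)) (segs : List (Int × Int)) :
    pvPair fe ((true, ms) :: rest) none segs = pvPair fe rest (some ms) segs := rfl
theorem pvPairClose (fe ms st : Int) (rest : List (Bool × Int)) (segs : List (Int × Int)) :
    pvPair fe ((false, ms) :: rest) (some st) segs
      = pvPair fe rest none (if st < ms then segs ++ [(st, ms)] else segs) := rfl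
theorem pvPairSkipOpen (fe ms st : Int) (rest : List (Bool × Int)) (segs : List (Int × Int)) :
    pvPair fe ((true, ms) :: rest) (some st) segs = pvPair fe rest (some st) segs := rfl
theorem pvPairSkipClose (fe ms : Int) (rest : List (Bool × Int)) (segs : List (Int × Int)) :
    pvPair fe ((false, ms) :: rest) none segs = pvPair fe rest none segs := rfl

-- Simulation: running A's hysteresis loop and then flushing equals pairing the
-- event stream, given the invariant that A's counters equal the current flag
-- streak in the relevant mode and are below their thresholds.
theorem pvSim (fdm msf msl fe : Int) (hmsf : 1 ≤ msf) (hmsl : 1 ≤ msl) :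
    ∀ (L : List (Int × Bool)) (segs : List (Int × Int)) (inSp : Bool)
      (start cs csil streak : Int) (prev : Option Bool),
    (inSp = false → cs = (if prev = some true then streak else 0)) →
    (inSp = false → cs < msf) →
    (inSp = true → csil = (if prev = some false then streak else 0)) →
    (inSp = true → csil < msl) →
    pvFlush fe (pvLoopA fdm msf msl L (segs, inSp, start, cs, csil)) =
    pvPair fe (pvEvents fdm msf msl L prev streak) (if inSp = true then some start else none) segs := by
  intro L
  induction L with
  | nil =>
    intro segs inSp start cs csil streak prev _ _ _ _
    cases inSp <;> simp [pvLoopA, pvEvents, pvPair, pvFlush]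
  | cons p rest ih =>
    obtain ⟨t, f⟩ := p
    intro segs inSp start cs csil streak prev h1 h2 h3 h4
    cases inSp with
    | false =>
      have hcs := h1 rfl
      have hcslt := h2 rfl
      cases f with
      | true =>
        have hs : cs + 1 = (if prev = some true then streak + 1 else 1) := by
          by_cases hp : prev = some true <;> simp [hp] at hcs ⊢ <;> omega
        by_cases hop : msf ≤ cs + 1
        · have heq : (if prev = some true then streak + 1 else 1) = msf := by omega
          have hA : pvLoopA fdm msf msl ((t, true) :: rest) (segs, false, start, cs, csil)
              = pvLoopA fdm msf msl rest (segs, true, t - (cs + 1 - 1) * fdm, cs + 1, 0) := by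
            simp [pvLoopA, hop]
          have hE : pvEvents fdm msf msl ((t, true) :: rest) prev streak
              = (true, t - (msf - 1) * fdm) ::
                pvEvents fdm msf msl rest (some true) (if prev = some true then streak + 1 else 1) := by
            simp [pvEvents, heq]
          rw [hA, hE]
          simp only [Bool.false_eq_true, if_false]
          rw [pvPairOpen]
          have harg : t - (cs + 1 - 1) * fdm = t - (msf - 1) * fdm := by
            have hx : cs + 1 = msf := by omega
            rw [hx]
          rw [harg]
          have := ih segs true (t - (msf - 1) * fdm) (cs + 1) 0 msf (some true)
            (fun h => nomatch h) (fun h => nomatch h) (fun _ => by simp) (fun _ => by omega)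
          simpa [heq] using this
        · have hne : ¬ (if prev = some true then streak + 1 else 1) = msf := by omega
          have hA : pvLoopA fdm msf msl ((t, true) :: rest) (segs, false, start, cs, csil)
              = pvLoopA fdm msf msl rest (segs, false, start, cs + 1, csil) := by
            simp [pvLoopA, hop]
          have hE : pvEvents fdm msf msl ((t, true) :: rest) prev streak
              = pvEvents fdm msf msl rest (some true) (if prev = some true then streak + 1 else 1) := by
            simp [pvEvents, hne]
          rw [hA, hE]
          have := ih segs false start (cs + 1) csil
            (if prev = some true then streak + 1 else 1) (some true)
            (fun _ => by simpa using hs) (fun _ => by omega)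
            (fun h => nomatch h) (fun h => nomatch h)
          simpa using this
      | false =>
        have hA : pvLoopA fdm msf msl ((t, false) :: rest) (segs, false, start, cs, csil)
            = pvLoopA fdm msf msl rest (segs, false, start, 0, csil) := by
          simp [pvLoopA]
        have hIH := ih segs false start 0 csil
          (if prev = some false then streak + 1 else 1) (some false)
          (fun _ => by simp) (fun _ => by omega)
          (fun h => nomatch h) (fun h => nomatch h)
        by_cases hcl : (if prev = some false then streak + 1 else 1) = msl
        · have hE : pvEvents fdm msf msl ((t, false) :: rest) prev streak
              = (false, t - (msl - 1) * fdm) ::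
                pvEvents fdm msf msl rest (some false) (if prev = some false then streak + 1 else 1) := by
            simp [pvEvents, hcl]
          rw [hA, hE]
          simp only [Bool.false_eq_true, if_false]
          rw [pvPairSkipClose]
          simpa using hIH
        · have hE : pvEvents fdm msf msl ((t, false) :: rest) prev streak
              = pvEvents fdm msf msl rest (some false) (if prev = some false then streak + 1 else 1) := by
            simp [pvEvents, hcl]
          rw [hA, hE]
          simpa using hIH
    | true =>
      have hcsil := h3 rfl
      have hcsillt := h4 rfl
      cases f with
      | true =>
        have hA : pvLoopA fdm msf msl ((t, true) :: rest) (segs, true, start, cs, csil)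
            = pvLoopA fdm msf msl rest (segs, true, start, cs, 0) := by
          simp [pvLoopA]
        have hIH := ih segs true start cs 0
          (if prev = some true then streak + 1 else 1) (some true)
          (fun h => nomatch h) (fun h => nomatch h)
          (fun _ => by simp) (fun _ => by omega)
        by_cases hop : (if prev = some true then streak + 1 else 1) = msf
        · have hE : pvEvents fdm msf msl ((t, true) :: rest) prev streak
              = (true, t - (msf - 1) * fdm) ::
                pvEvents fdm msf msl rest (some true) (if prev = some true then streak + 1 else 1) := by
            simp [pvEvents, hop]
          rw [hA, hE]
          simp only [reduceIte]
          rw [pvPairSkipOpen]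
          simpa using hIH
        · have hE : pvEvents fdm msf msl ((t, true) :: rest) prev streak
              = pvEvents fdm msf msl rest (some true) (if prev = some true then streak + 1 else 1) := by
            simp [pvEvents, hop]
          rw [hA, hE]
          simpa using hIH
      | false =>
        have hs : csil + 1 = (if prev = some false then streak + 1 else 1) := by
          by_cases hp : prev = some false <;> simp [hp] at hcsil ⊢ <;> omega
        by_cases hcl : msl ≤ csil + 1
        · have heq : (if prev = some false then streak + 1 else 1) = msl := by omega
          have harg : t - (csil + 1 - 1) * fdm = t - (msl - 1) * fdm := by
            have hx : csil + 1 = msl := by omega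
            rw [hx]
          have hcm : csil + 1 = msl := by omega
          have hA : pvLoopA fdm msf msl ((t, false) :: rest) (segs, true, start, cs, csil)
              = pvLoopA fdm msf msl rest
                  ((if start < t - (msl - 1) * fdm then segs ++ [(start, t - (msl - 1) * fdm)] else segs),
                   false, start, 0, csil + 1) := by
            simp [pvLoopA, hcm]
          have hE : pvEvents fdm msf msl ((t, false) :: rest) prev streak
              = (false, t - (msl - 1) * fdm) ::
                pvEvents fdm msf msl rest (some false) (if prev = some false then streak + 1 else 1) := by
            simp [pvEvents, heq]
          rw [hA, hE]
          simp only [reduceIte]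
          rw [pvPairClose]
          have := ih (if start < t - (msl - 1) * fdm then segs ++ [(start, t - (msl - 1) * fdm)] else segs)
            false start 0 (csil + 1)
            (if prev = some false then streak + 1 else 1) (some false)
            (fun _ => by simp) (fun _ => by omega)
            (fun h => nomatch h) (fun h => nomatch h)
          simpa using this
        · have hne : ¬ (if prev = some false then streak + 1 else 1) = msl := by omega
          have hA : pvLoopA fdm msf msl ((t, false) :: rest) (segs, true, start, cs, csil)
              = pvLoopA fdm msf msl rest (segs, true, start, cs, csil + 1) := by
            simp [pvLoopA, hcl]
          have hE : pvEvents fdm msf msl ((t, false) :: rest) prev streak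
              = pvEvents fdm msf msl rest (some false) (if prev = some false then streak + 1 else 1) := by
            simp [pvEvents, hne]
          rw [hA, hE]
          have := ih segs true start cs (csil + 1)
            (if prev = some false then streak + 1 else 1) (some false)
            (fun h => nomatch h) (fun h => nomatch h)
            (fun _ => by simpa using hs) (fun _ => by omega)
          simpa using this

-- ===== VERDICT (by name: the statement is the Claim_ definition above) =====
theorem frames_to_segments_spec : Claim_equal_frames_to_segments := by
  intro frames speech_flags fdm msp mss _ _
  unfold Spec_frames_to_segments frames_to_segments frames_to_segments_alt
  by_cases hemp : frames = [] ∨ speech_flags = []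
  · rw [if_pos hemp, if_pos hemp]
  · rw [if_neg hemp, if_neg hemp]
    have h := pvSim fdm (max 1 (PySem.Int.floordiv msp fdm)) (max 1 (PySem.Int.floordiv mss fdm))
      ((PySem.List.pyGet? (frames.map Prod.fst) (-1)).getD 0 + fdm)
      (le_max_left _ _) (le_max_left _ _)
      ((frames.map Prod.fst).zip speech_flags) [] false 0 0 0 0 none
      (fun _ => by simp) (fun _ => by omega) (fun h => nomatch h) (fun h => nomatch h)
    simp only [pvFlush] at h
    exact h
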